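-- pv_equiv track=rewrite | github.com/sago2693/yolo-people-clustering | utils.py | get_mention_assignments
-- ===== SOURCE A (Python) =====
-- def get_mention_assignments(inp_clusters, out_clusters):
--     mention_cluster_ids = {}
--     out_dic = {}
--     for i, c in enumerate(out_clusters):
--         for m in c:
--             out_dic[m] = i
--
--     for ic in inp_clusters:
--         for im in ic:
--             if im in out_dic:
--                 mention_cluster_ids[im] = out_dic[im]
--
--     return mention_cluster_ids
-- ===== SOURCE B (Python) =====
-- def _last_idx(m, out_clusters):
--     for j in range(len(out_clusters) - 1, -1, -1):
--         if m in out_clusters[j]: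
--             return j
--     return None
--
-- def get_mention_assignments(inp_clusters, out_clusters):
--     result = {}
--     for ic in inp_clusters:
--         for im in ic:
--             j = _last_idx(im, out_clusters)
--             if j is not None:
--                 result[im] = j
--     return result
-- ===== Notes on version B (the rewrite author's own statement) =====
-- stated objective: alternative
-- what changed: Replaces A's pre-built mention->cluster dictionary with a per-mention reverse linear search over out_clusters (first hit from the end = last-wins), so no index dictionary is ever constructed.
import Mathlib
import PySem

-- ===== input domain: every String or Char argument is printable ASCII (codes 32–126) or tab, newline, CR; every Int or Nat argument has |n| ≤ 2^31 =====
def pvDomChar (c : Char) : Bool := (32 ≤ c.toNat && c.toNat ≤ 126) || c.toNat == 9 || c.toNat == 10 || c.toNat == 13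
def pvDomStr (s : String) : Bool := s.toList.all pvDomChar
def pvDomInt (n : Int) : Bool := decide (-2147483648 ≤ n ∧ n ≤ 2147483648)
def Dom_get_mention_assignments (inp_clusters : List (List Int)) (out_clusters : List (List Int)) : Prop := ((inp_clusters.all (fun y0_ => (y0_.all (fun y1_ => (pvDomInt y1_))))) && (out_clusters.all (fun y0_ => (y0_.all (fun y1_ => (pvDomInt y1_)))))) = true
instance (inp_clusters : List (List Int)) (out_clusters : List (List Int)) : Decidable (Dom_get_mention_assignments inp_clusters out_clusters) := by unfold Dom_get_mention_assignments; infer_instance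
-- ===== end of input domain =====

-- B replaces A's pre-built mention->index dictionary by a per-mention reverse linear search
-- over out_clusters (alternative decomposition, not claimed faster).

-- ===== PORT A =====
-- out_dic built by `for i, c in enumerate(out_clusters): for m in c: out_dic[m] = i`
def pvOutDic (out_clusters : List (List Int)) : PySem.Dict Int Int :=
  (PySem.List.enumerate out_clusters 0).foldl
    (fun d p => p.2.foldl (fun d m => d.insert m p.1) d) PySem.Dict.empty

def get_mention_assignments (inp_clusters : List (List Int)) (out_clusters : List (List Int)) : List (Int × Int) :=
  let out_dic := pvOutDic out_clusters
  -- `if im in out_dic: mention_cluster_ids[im] = out_dic[im]` : the none branch is the failed guard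
  (inp_clusters.foldl (fun r ic =>
      ic.foldl (fun r im =>
        match out_dic.get? im with
        | some v => r.insert im v
        | none => r) r) PySem.Dict.empty).items

-- ===== PORT B =====
-- `for j in range(len(out_clusters)-1, -1, -1): if m in out_clusters[j]: return j` / `return None`
def pvLastIdxAux (m : Int) (out_clusters : List (List Int)) : Nat → Option Int
  | 0 => none
  | j + 1 =>
    if m ∈ (PySem.List.pyGet? out_clusters (j : Int)).getD [] then some (j : Int)
    else pvLastIdxAux m out_clusters j

def pvLastIdx (m : Int) (out_clusters : List (List Int)) : Option Int :=
  pvLastIdxAux m out_clusters out_clusters.length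

def get_mention_assignments_alt (inp_clusters : List (List Int)) (out_clusters : List (List Int)) : List (Int × Int) :=
  (inp_clusters.foldl (fun r ic =>
      ic.foldl (fun r im =>
        match pvLastIdx im out_clusters with
        | some j => r.insert im j
        | none => r) r) PySem.Dict.empty).items

-- ===== PRECONDITION & SPEC =====
def Spec_get_mention_assignments (inp_clusters : List (List Int)) (out_clusters : List (List Int)) (out : List (Int × Int)) : Prop := out = get_mention_assignments_alt inp_clusters out_clusters
instance (inp_clusters : List (List Int)) (out_clusters : List (List Int)) (out : List (Int × Int)) : Decidable (Spec_get_mention_assignments inp_clusters out_clusters out) := by unfold Spec_get_mention_assignments; infer_instance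

-- ===== CLAIM (what is proved, stated in full; the proofs are below) =====
def Claim_equal_get_mention_assignments : Prop := ∀ (inp_clusters : List (List Int)) (out_clusters : List (List Int)), Dom_get_mention_assignments inp_clusters out_clusters → Spec_get_mention_assignments inp_clusters out_clusters (get_mention_assignments inp_clusters out_clusters)

-- ===== LEMMAS AND PROOFS =====

-- inner fold of A's dictionary build: insert every m of c at index n
theorem pv_get?_foldl_insert (c : List Int) (d : PySem.Dict Int Int) (n m : Int) :
    (c.foldl (fun d x => d.insert x n) d).get? m
      = if m ∈ c then some n else d.get? m := by
  induction c generalizing d with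
  | nil => simp
  | cons a c ih =>
    simp only [List.foldl_cons, ih, List.mem_cons]
    by_cases hc : m ∈ c
    · simp [hc]
    · by_cases ha : m = a
      · simp [ha, PySem.Dict.get?_insert_self]
      · simp [hc, ha, PySem.Dict.get?_insert_of_ne _ _ ha]

-- pvLastIdxAux only inspects indices < k, so an appended cluster is invisible below xs.length
theorem pvLastIdxAux_append (m : Int) (xs : List (List Int)) (c : List Int) (k : Nat)
    (hk : k ≤ xs.length) :
    pvLastIdxAux m (xs ++ [c]) k = pvLastIdxAux m xs k := by
  induction k with
  | zero => rfl
  | succ j ih =>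
    have hj : j < xs.length := by omega
    have hget : (PySem.List.pyGet? (xs ++ [c]) (j : Int)) = (PySem.List.pyGet? xs (j : Int)) := by
      simp [PySem.List.pyGet?_natCast, List.getElem?_append_left hj]
    simp only [pvLastIdxAux, hget, ih (by omega)]

-- A's dictionary lookup = B's reverse search
theorem pv_outDic_eq_lastIdx (out_clusters : List (List Int)) (m : Int) :
    (pvOutDic out_clusters).get? m = pvLastIdx m out_clusters := by
  induction out_clusters using List.reverseRecOn with
  | nil => rfl
  | append_singleton xs c ih =>
    have hbuild : pvOutDic (xs ++ [c])
        = c.foldl (fun d x => d.insert x ((xs.length : Int))) (pvOutDic xs) := by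
      simp [pvOutDic, PySem.List.enumerate_append, List.foldl_append]
    have hget : (PySem.List.pyGet? (xs ++ [c]) ((xs.length : Nat) : Int)) = some c := by
      have := PySem.List.pyGet?_append_length (pre := xs) (y := c) (ys := ([] : List (List Int)))
      simpa using this
    simp only [hbuild, pv_get?_foldl_insert, pvLastIdx, List.length_append,
      List.length_singleton, pvLastIdxAux, hget, Option.getD_some]
    by_cases hm : m ∈ c
    · simp [hm]
    · simp [hm, ih, pvLastIdx, pvLastIdxAux_append m xs c xs.length le_rfl]

-- ===== VERDICT (by name: the statement is the Claim_ definition above) =====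
theorem get_mention_assignments_spec : Claim_equal_get_mention_assignments := by
  intro inp out _
  unfold Spec_get_mention_assignments get_mention_assignments get_mention_assignments_alt
  simp only [pv_outDic_eq_lastIdx]
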